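-- pv_equiv track=rewrite | github.com/AnasImloul/Translation_Engine_Python | syllables.py | distance_vowels
-- ===== SOURCE A (Python) =====
-- vowels = {
--     "a" : {"e":1,"i":1},
--     "e" : {"a":1,"i":2,"":1},
--     "i" : {"e":1,"a":1},
--     "o" : {"u":1},
--     "u":{"o":1, "a":2}
-- }
--
-- composite_vowels = {
--                     "au" : {"o":1, "u":2},
--                     "ou" : {"o":1, "u":2},
--                     "ea" : {"e":1, "a":2,"i":3,"":1},
--                     "ae" : {"e":1, "a":2,"i":3},
--                     "oe" : {"e":1, "o" :2},
-- }
--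
-- def distance_vowels(vowel1, vowel2):
--
--     if vowel1 == vowel2:
--         return 0
--
--     parents1 = {}
--     parents2 = {}
--
--     d = 8
--
--
--
--     if vowel1 in composite_vowels:
--         parents1 = composite_vowels[vowel1]
--
--         if vowel2 in composite_vowels:
--             parents2 = composite_vowels[vowel2]
--
--             intersect = parents1.keys() & parents2.keys()
--
--
--             for vowel in intersect:
--                 # use only one way distance since we want to check similarity to the dictionary and not the reversed direction
--                 d = min(d, parents1[vowel])# + parents2[vowel])
--
--             return d
--
--         elif vowel2 in vowels:
--             d = parents1.get(vowel2,d)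
--             return d
--
--     elif vowel1 in vowels:
--
--         if vowel2 in composite_vowels:
--             parents2 = composite_vowels[vowel2]
--
--             if vowel1 in vowels:
--                 d = parents2.get(vowel1, d)
--                 return d
--         elif vowel2 in vowels:
--             #use only one way distance since we want to check similarity to the dictionary and not the reversed direction
--             d = min(vowels[vowel2].get(vowel1, d), vowels[vowel1].get(vowel2, d))
--             return d
--
--     return d
-- ===== SOURCE B (Python) =====
-- vowels = {
--     "a" : {"e":1,"i":1},
--     "e" : {"a":1,"i":2,"":1},
--     "i" : {"e":1,"a":1},
--     "o" : {"u":1},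
--     "u":{"o":1, "a":2}
-- }
--
-- composite_vowels = {
--                     "au" : {"o":1, "u":2},
--                     "ou" : {"o":1, "u":2},
--                     "ea" : {"e":1, "a":2,"i":3,"":1},
--                     "ae" : {"e":1, "a":2,"i":3},
--                     "oe" : {"e":1, "o" :2},
-- }
--
-- # Flat pair->distance table built once from the rule tables.
-- _D = {}
-- for _v1, _p1 in composite_vowels.items():
--     for _v2, _p2 in composite_vowels.items():
--         _common = [k for k in _p1 if k in _p2]
--         if _common:
--             _D[(_v1, _v2)] = min(_p1[k] for k in _common)
--     for _v2 in vowels: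
--         if _v2 in _p1:
--             _D[(_v1, _v2)] = _p1[_v2]
-- for _v1 in vowels:
--     for _v2, _p2 in composite_vowels.items():
--         if _v1 in _p2:
--             _D[(_v1, _v2)] = _p2[_v1]
--     for _v2 in vowels:
--         _m = min(vowels[_v2].get(_v1, 8), vowels[_v1].get(_v2, 8))
--         if _m < 8:
--             _D[(_v1, _v2)] = _m
--
-- def distance_vowels(vowel1, vowel2):
--     if vowel1 == vowel2:
--         return 0
--     return _D.get((vowel1, vowel2), 8)
-- ===== Notes on version B (the rewrite author's own statement) =====
-- stated objective: simpler
-- what changed: A's nested membership tests and per-call conditional walks over the two rule tables are replaced by one flat dict mapping (vowel1, vowel2) pairs to distances, precomputed once from the tables, so the function body becomes an equality check plus a single dict lookup with default 8.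
import Mathlib
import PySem

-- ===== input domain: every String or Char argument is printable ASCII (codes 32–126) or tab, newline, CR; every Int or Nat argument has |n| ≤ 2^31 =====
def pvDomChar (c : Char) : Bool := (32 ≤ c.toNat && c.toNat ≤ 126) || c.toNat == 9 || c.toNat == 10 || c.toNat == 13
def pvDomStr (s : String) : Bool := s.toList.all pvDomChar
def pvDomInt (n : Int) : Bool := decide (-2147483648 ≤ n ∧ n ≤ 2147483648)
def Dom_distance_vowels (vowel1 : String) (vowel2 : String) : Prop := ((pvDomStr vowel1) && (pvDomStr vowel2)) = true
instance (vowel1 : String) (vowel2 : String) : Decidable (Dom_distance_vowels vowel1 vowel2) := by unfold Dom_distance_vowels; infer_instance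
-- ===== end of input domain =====

-- B replaces A's nested conditional table-walking by one flat (pair → distance) dict built once; objective: simpler lookups, same cost.

-- ===== PORT A =====
-- the module-level rule tables (shared data for both ports)
def pvVowels : PySem.Dict String (PySem.Dict String Int) :=
  PySem.Dict.ofList
    [("a", PySem.Dict.ofList [("e",1),("i",1)]),
     ("e", PySem.Dict.ofList [("a",1),("i",2),("",1)]),
     ("i", PySem.Dict.ofList [("e",1),("a",1)]),
     ("o", PySem.Dict.ofList [("u",1)]),
     ("u", PySem.Dict.ofList [("o",1),("a",2)])]

def pvComposite : PySem.Dict String (PySem.Dict String Int) :=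
  PySem.Dict.ofList
    [("au", PySem.Dict.ofList [("o",1),("u",2)]),
     ("ou", PySem.Dict.ofList [("o",1),("u",2)]),
     ("ea", PySem.Dict.ofList [("e",1),("a",2),("i",3),("",1)]),
     ("ae", PySem.Dict.ofList [("e",1),("a",2),("i",3)]),
     ("oe", PySem.Dict.ofList [("e",1),("o",2)])]

-- literal port of A; 'parents1[vowel]' for a key of the intersection is ported as getD (the key is present);
-- the min-fold over the set intersection is order-insensitive, so the Set's first-insertion order is exact here
def distance_vowels (vowel1 : String) (vowel2 : String) : Int :=
  if vowel1 == vowel2 then 0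
  else
    let d : Int := 8
    match pvComposite.get? vowel1 with
    | some parents1 =>
      match pvComposite.get? vowel2 with
      | some parents2 =>
        let intersect : PySem.Set String :=
          PySem.Set.inter (PySem.Set.ofList (PySem.Dict.keys parents1))
                          (PySem.Set.ofList (PySem.Dict.keys parents2))
        intersect.foldl (fun d v => min d (parents1.getD v 8)) d
      | none =>
        if pvVowels.contains vowel2 then parents1.getD vowel2 d else d
    | none =>
      match pvVowels.get? vowel1 with
      | some _ =>
        match pvComposite.get? vowel2 with
        | some parents2 =>
          if pvVowels.contains vowel1 then parents2.getD vowel1 d else d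
        | none =>
          if pvVowels.contains vowel2 then
            min ((pvVowels.getD vowel2 PySem.Dict.empty).getD vowel1 d)
                ((pvVowels.getD vowel1 PySem.Dict.empty).getD vowel2 d)
          else d
      | none => d

-- ===== PORT B =====
-- _D of Source B: flat (vowel1, vowel2) → distance table built once from the rule tables
def pvFlat : PySem.Dict (String × String) Int :=
  let D : PySem.Dict (String × String) Int := PySem.Dict.empty
  let D := pvComposite.items.foldl (fun D p1 =>
    let D := pvComposite.items.foldl (fun D p2 =>
      match (PySem.Dict.keys p1.2).filter (fun k => p2.2.contains k) with
      | [] => D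
      | c :: cs =>
        D.insert (p1.1, p2.1) (cs.foldl (fun m k => min m (p1.2.getD k 8)) (p1.2.getD c 8))) D
    pvVowels.keys.foldl (fun D v2 =>
      if p1.2.contains v2 then D.insert (p1.1, v2) (p1.2.getD v2 8) else D) D) D
  pvVowels.keys.foldl (fun D v1 =>
    let D := pvComposite.items.foldl (fun D p2 =>
      if p2.2.contains v1 then D.insert (v1, p2.1) (p2.2.getD v1 8) else D) D
    pvVowels.keys.foldl (fun D v2 =>
      let m := min ((pvVowels.getD v2 PySem.Dict.empty).getD v1 8)
                   ((pvVowels.getD v1 PySem.Dict.empty).getD v2 8)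
      if m < 8 then D.insert (v1, v2) m else D) D) D

def distance_vowels_alt (vowel1 : String) (vowel2 : String) : Int :=
  if vowel1 == vowel2 then 0 else pvFlat.getD (vowel1, vowel2) 8

-- ===== PRECONDITION & SPEC =====
def Spec_distance_vowels (vowel1 : String) (vowel2 : String) (out : Int) : Prop := out = distance_vowels_alt vowel1 vowel2
instance (vowel1 : String) (vowel2 : String) (out : Int) : Decidable (Spec_distance_vowels vowel1 vowel2 out) := by unfold Spec_distance_vowels; infer_instance

-- ===== CLAIM (what is proved, stated in full; the proofs are below) =====
def Claim_equal_distance_vowels : Prop := ∀ (vowel1 : String) (vowel2 : String), Dom_distance_vowels vowel1 vowel2 → Spec_distance_vowels vowel1 vowel2 (distance_vowels vowel1 vowel2)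

-- ===== LEMMAS AND PROOFS =====

-- the known tokens: all outer keys of both rule tables
def pvTokens : List String := ["a", "e", "i", "o", "u", "au", "ou", "ea", "ae", "oe"]

set_option maxRecDepth 40000 in
lemma pvFlat_keys_known : ∀ p ∈ pvFlat.keys, p.1 ∈ pvTokens ∧ p.2 ∈ pvTokens := by decide

lemma pvComposite_keys : pvComposite.keys = ["au", "ou", "ea", "ae", "oe"] := by decide

lemma pvVowels_keys : pvVowels.keys = ["a", "e", "i", "o", "u"] := by decide

lemma alt_eight_of_unknown (v1 v2 : String) (hne : v1 ≠ v2)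
    (h : v1 ∉ pvTokens ∨ v2 ∉ pvTokens) :
    distance_vowels_alt v1 v2 = 8 := by
  have hc : pvFlat.contains (v1, v2) = false := by
    rw [PySem.Dict.contains_eq_decide_mem_keys]
    simp only [decide_eq_false_iff_not]
    intro hmem
    rcases h with h | h
    · exact h (pvFlat_keys_known _ hmem).1
    · exact h (pvFlat_keys_known _ hmem).2
  simp [distance_vowels_alt, hne, PySem.Dict.getD_of_not_contains _ _ hc]

lemma a_eight_of_unknown_left (v1 v2 : String) (hne : v1 ≠ v2) (h1 : v1 ∉ pvTokens) :
    distance_vowels v1 v2 = 8 := by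
  have hc1 : pvComposite.get? v1 = none := by
    rw [PySem.Dict.get?_eq_none_iff_not_mem_keys, pvComposite_keys]
    intro hm
    exact h1 (by simp only [pvTokens, List.mem_cons, List.not_mem_nil] at hm ⊢; tauto)
  have hv1 : pvVowels.get? v1 = none := by
    rw [PySem.Dict.get?_eq_none_iff_not_mem_keys, pvVowels_keys]
    intro hm
    exact h1 (by simp only [pvTokens, List.mem_cons, List.not_mem_nil] at hm ⊢; tauto)
  simp [distance_vowels, hne, hc1, hv1]

lemma a_eight_of_unknown_right (v1 v2 : String) (hne : v1 ≠ v2) (h2 : v2 ∉ pvTokens) :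
    distance_vowels v1 v2 = 8 := by
  have hc2 : pvComposite.get? v2 = none := by
    rw [PySem.Dict.get?_eq_none_iff_not_mem_keys, pvComposite_keys]
    intro hm
    exact h2 (by simp only [pvTokens, List.mem_cons, List.not_mem_nil] at hm ⊢; tauto)
  have hv2 : pvVowels.contains v2 = false := by
    rw [PySem.Dict.contains_eq_decide_mem_keys, pvVowels_keys]
    simp only [decide_eq_false_iff_not]
    intro hm
    exact h2 (by simp only [pvTokens, List.mem_cons, List.not_mem_nil] at hm ⊢; tauto)
  cases hA : pvComposite.get? v1 with
  | some p1 => simp [distance_vowels, hne, hA, hc2, hv2]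
  | none =>
    cases hB : pvVowels.get? v1 with
    | some p => simp [distance_vowels, hne, hA, hB, hc2, hv2]
    | none => simp [distance_vowels, hne, hA, hB]

set_option maxRecDepth 40000 in
theorem distance_vowels_eq (v1 v2 : String) : distance_vowels v1 v2 = distance_vowels_alt v1 v2 := by
  by_cases hne : v1 = v2
  · subst hne; simp [distance_vowels, distance_vowels_alt]
  · by_cases h1 : v1 ∈ pvTokens
    · by_cases h2 : v2 ∈ pvTokens
      · have h1' : v1 ∈ (["a", "e", "i", "o", "u", "au", "ou", "ea", "ae", "oe"] : List String) := h1
        have h2' : v2 ∈ (["a", "e", "i", "o", "u", "au", "ou", "ea", "ae", "oe"] : List String) := h2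
        fin_cases h1' <;> fin_cases h2' <;> first | (exact absurd rfl hne) | decide
      · rw [a_eight_of_unknown_right v1 v2 hne h2, alt_eight_of_unknown v1 v2 hne (Or.inr h2)]
    · rw [a_eight_of_unknown_left v1 v2 hne h1, alt_eight_of_unknown v1 v2 hne (Or.inl h1)]

-- ===== VERDICT (by name: the statement is the Claim_ definition above) =====
theorem distance_vowels_spec : Claim_equal_distance_vowels := by
  intro v1 v2 _
  exact distance_vowels_eq v1 v2
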